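-- pv_equiv track=rewrite | github.com/AdamPiechowiak/Tree | skrypt.py | obliczIloczyn1
-- ===== SOURCE A (Python) =====
-- def obliczIloczyn1(tab, wierzcholek):
--
-- 	wynik = []
--
-- 	wynik.append(int(wierzcholek))
-- 	for w2 in tab[1]:
-- 		wynik.append(int(wierzcholek)*int(w2))
-- 		for w3 in tab[2]:
-- 			wynik.append(int(wierzcholek)*int(w2)*int(w3))
-- 			for w4 in tab[3]:
-- 				wynik.append(int(wierzcholek)*int(w2)*int(w3)*int(w4))
-- 				for w5 in tab[4]:
-- 					wynik.append(int(wierzcholek)*int(w2)*int(w3)*int(w4)*int(w5))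
-- 					for w6 in tab[5]:
-- 						wynik.append(int(wierzcholek)*int(w2)*int(w3)*int(w4)*int(w5)*int(w6))
-- 						for w7 in tab[6]:
-- 							wynik.append(int(wierzcholek)*int(w2)*int(w3)*int(w4)*int(w5)*int(w6)*int(w7))
--
--
-- 	return wynik
-- ===== SOURCE B (Python) =====
-- def obliczIloczyn1(tab, wierzcholek):
--     wynik = [int(wierzcholek)]
--
--     def rek(level, acc):
--         for w in tab[level]:
--             p = acc * int(w)
--             wynik.append(p)
--             if level < 6:
--                 rek(level + 1, p)
--
--     rek(1, int(wierzcholek))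
--     return wynik
-- ===== Notes on version B (the rewrite author's own statement) =====
-- stated objective: simpler
-- what changed: Replaced the six hard-coded nested for-loops by one short recursive helper rek(level, acc) that walks tab[level] and recurses while level < 6, emitting the same partial products in the same preorder.
import Mathlib
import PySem

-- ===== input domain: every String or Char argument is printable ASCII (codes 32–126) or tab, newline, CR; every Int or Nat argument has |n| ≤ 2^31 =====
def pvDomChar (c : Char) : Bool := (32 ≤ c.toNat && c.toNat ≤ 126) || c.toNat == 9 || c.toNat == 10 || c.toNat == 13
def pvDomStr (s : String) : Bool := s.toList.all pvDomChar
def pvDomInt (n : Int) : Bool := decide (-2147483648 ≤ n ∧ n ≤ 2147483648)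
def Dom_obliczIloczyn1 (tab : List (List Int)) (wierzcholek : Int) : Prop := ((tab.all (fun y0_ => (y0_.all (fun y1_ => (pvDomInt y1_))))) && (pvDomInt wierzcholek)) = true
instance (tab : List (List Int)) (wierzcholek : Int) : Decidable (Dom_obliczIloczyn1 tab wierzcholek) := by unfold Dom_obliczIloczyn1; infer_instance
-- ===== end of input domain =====

-- B replaces A's six hard-coded nested for-loops by one short recursive helper over the
-- level number (objective: simpler); return values agree on every input where A returns.

-- ===== PORT A =====
-- tab[k] (k = 1..6) is ported as tab.getD k []; Pre_ admits exactly the inputs where every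
-- access A actually performs is in range (Python raises IndexError otherwise), so the
-- default is never consulted under Pre_.
def obliczIloczyn1 (tab : List (List Int)) (wierzcholek : Int) : List Int :=
  (tab.getD 1 []).foldl (fun wynik w2 =>
    (tab.getD 2 []).foldl (fun wynik w3 =>
      (tab.getD 3 []).foldl (fun wynik w4 =>
        (tab.getD 4 []).foldl (fun wynik w5 =>
          (tab.getD 5 []).foldl (fun wynik w6 =>
            (tab.getD 6 []).foldl (fun wynik w7 =>
              wynik ++ [wierzcholek * w2 * w3 * w4 * w5 * w6 * w7])
              (wynik ++ [wierzcholek * w2 * w3 * w4 * w5 * w6]))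
            (wynik ++ [wierzcholek * w2 * w3 * w4 * w5]))
          (wynik ++ [wierzcholek * w2 * w3 * w4]))
        (wynik ++ [wierzcholek * w2 * w3]))
      (wynik ++ [wierzcholek * w2]))
    [wierzcholek]

-- ===== PORT B =====
-- rek(level, acc) of Source B: emits acc*w for each w of tab[level], recursing while level < 6;
-- written as structural recursion over the current level's list, in emission (preorder) order.
def rekAux (tab : List (List Int)) (level : Nat) (acc : Int) : List Int → List Int
  | [] => []
  | w :: rest =>
      let p := acc * w
      let sub := if level < 6 then rekAux tab (level + 1) p (tab.getD (level + 1) []) else []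
      (p :: sub) ++ rekAux tab level acc rest
termination_by ws => (6 - level, ws.length)
decreasing_by
  · left; omega
  · right; simp

def obliczIloczyn1_alt (tab : List (List Int)) (wierzcholek : Int) : List Int :=
  wierzcholek :: rekAux tab 1 wierzcholek (tab.getD 1 [])

-- ===== PRECONDITION & SPEC =====
-- Pre_ admits exactly the inputs on which Python A returns: for each level k = 1..6 that
-- control flow reaches (all earlier levels nonempty), tab[k] must exist; otherwise A (and B)
-- raise IndexError.
def Pre_obliczIloczyn1 (tab : List (List Int)) (wierzcholek : Int) : Prop :=
  ∀ k ∈ [1, 2, 3, 4, 5, 6], (∀ j ∈ [1, 2, 3, 4, 5], j < k → tab.getD j [] ≠ []) → k < tab.length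
instance (tab : List (List Int)) (wierzcholek : Int) : Decidable (Pre_obliczIloczyn1 tab wierzcholek) := by unfold Pre_obliczIloczyn1; infer_instance

def pvWitness_obliczIloczyn1 : List (List Int) × Int := ([[9], [2, 3], [4], [], [7]], 5)

def Spec_obliczIloczyn1 (tab : List (List Int)) (wierzcholek : Int) (out : List Int) : Prop := out = obliczIloczyn1_alt tab wierzcholek
instance (tab : List (List Int)) (wierzcholek : Int) (out : List Int) : Decidable (Spec_obliczIloczyn1 tab wierzcholek out) := by unfold Spec_obliczIloczyn1; infer_instance

-- ===== CLAIM (what is proved, stated in full; the proofs are below) =====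
def Claim_equal_obliczIloczyn1 : Prop := ∀ (tab : List (List Int)) (wierzcholek : Int), Dom_obliczIloczyn1 tab wierzcholek → Pre_obliczIloczyn1 tab wierzcholek → Spec_obliczIloczyn1 tab wierzcholek (obliczIloczyn1 tab wierzcholek)

-- ===== LEMMAS AND PROOFS =====

theorem rekAux_nil (tab : List (List Int)) (level : Nat) (acc : Int) :
    rekAux tab level acc [] = [] := by simp [rekAux]

theorem rekAux_cons (tab : List (List Int)) (level : Nat) (acc : Int) (w : Int) (rest : List Int) :
    rekAux tab level acc (w :: rest) =
      (acc * w :: (if level < 6 then rekAux tab (level + 1) (acc * w) (tab.getD (level + 1) []) else []))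
        ++ rekAux tab level acc rest := by
  simp [rekAux]

theorem lvl6 (tab : List (List Int)) (acc : Int) (ws : List Int) (init : List Int) :
    ws.foldl (fun wynik w => wynik ++ [acc * w]) init = init ++ rekAux tab 6 acc ws := by
  induction ws generalizing init with
  | nil => simp [rekAux_nil]
  | cons w rest ih =>
      rw [List.foldl_cons, ih, rekAux_cons]
      simp [List.append_assoc]

theorem lvl5 (tab : List (List Int)) (acc : Int) (ws : List Int) (init : List Int) :
    ws.foldl (fun wynik w =>
      (tab.getD 6 []).foldl (fun wynik w7 => wynik ++ [acc * w * w7]) (wynik ++ [acc * w])) init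
      = init ++ rekAux tab 5 acc ws := by
  induction ws generalizing init with
  | nil => simp [rekAux_nil]
  | cons w rest ih =>
      rw [List.foldl_cons, lvl6 tab (acc * w), ih, rekAux_cons]
      simp [List.append_assoc]

theorem lvl4 (tab : List (List Int)) (acc : Int) (ws : List Int) (init : List Int) :
    ws.foldl (fun wynik w =>
      (tab.getD 5 []).foldl (fun wynik w6 =>
        (tab.getD 6 []).foldl (fun wynik w7 => wynik ++ [acc * w * w6 * w7])
          (wynik ++ [acc * w * w6])) (wynik ++ [acc * w])) init
      = init ++ rekAux tab 4 acc ws := by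
  induction ws generalizing init with
  | nil => simp [rekAux_nil]
  | cons w rest ih =>
      rw [List.foldl_cons, lvl5 tab (acc * w), ih, rekAux_cons]
      simp [List.append_assoc]

theorem lvl3 (tab : List (List Int)) (acc : Int) (ws : List Int) (init : List Int) :
    ws.foldl (fun wynik w =>
      (tab.getD 4 []).foldl (fun wynik w5 =>
        (tab.getD 5 []).foldl (fun wynik w6 =>
          (tab.getD 6 []).foldl (fun wynik w7 => wynik ++ [acc * w * w5 * w6 * w7])
            (wynik ++ [acc * w * w5 * w6])) (wynik ++ [acc * w * w5])) (wynik ++ [acc * w])) init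
      = init ++ rekAux tab 3 acc ws := by
  induction ws generalizing init with
  | nil => simp [rekAux_nil]
  | cons w rest ih =>
      rw [List.foldl_cons, lvl4 tab (acc * w), ih, rekAux_cons]
      simp [List.append_assoc]

theorem lvl2 (tab : List (List Int)) (acc : Int) (ws : List Int) (init : List Int) :
    ws.foldl (fun wynik w =>
      (tab.getD 3 []).foldl (fun wynik w4 =>
        (tab.getD 4 []).foldl (fun wynik w5 =>
          (tab.getD 5 []).foldl (fun wynik w6 =>
            (tab.getD 6 []).foldl (fun wynik w7 => wynik ++ [acc * w * w4 * w5 * w6 * w7])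
              (wynik ++ [acc * w * w4 * w5 * w6])) (wynik ++ [acc * w * w4 * w5]))
          (wynik ++ [acc * w * w4])) (wynik ++ [acc * w])) init
      = init ++ rekAux tab 2 acc ws := by
  induction ws generalizing init with
  | nil => simp [rekAux_nil]
  | cons w rest ih =>
      rw [List.foldl_cons, lvl3 tab (acc * w), ih, rekAux_cons]
      simp [List.append_assoc]

theorem lvl1 (tab : List (List Int)) (acc : Int) (ws : List Int) (init : List Int) :
    ws.foldl (fun wynik w =>
      (tab.getD 2 []).foldl (fun wynik w3 =>
        (tab.getD 3 []).foldl (fun wynik w4 =>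
          (tab.getD 4 []).foldl (fun wynik w5 =>
            (tab.getD 5 []).foldl (fun wynik w6 =>
              (tab.getD 6 []).foldl (fun wynik w7 => wynik ++ [acc * w * w3 * w4 * w5 * w6 * w7])
                (wynik ++ [acc * w * w3 * w4 * w5 * w6])) (wynik ++ [acc * w * w3 * w4 * w5]))
            (wynik ++ [acc * w * w3 * w4])) (wynik ++ [acc * w * w3])) (wynik ++ [acc * w])) init
      = init ++ rekAux tab 1 acc ws := by
  induction ws generalizing init with
  | nil => simp [rekAux_nil]
  | cons w rest ih =>
      rw [List.foldl_cons, lvl2 tab (acc * w), ih, rekAux_cons]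
      simp [List.append_assoc]

-- ===== VERDICT (by name: the statement is the Claim_ definition above) =====
theorem obliczIloczyn1_spec : Claim_equal_obliczIloczyn1 := by
  intro tab wierzcholek _ _
  unfold Spec_obliczIloczyn1 obliczIloczyn1 obliczIloczyn1_alt
  rw [lvl1 tab wierzcholek (tab.getD 1 []) [wierzcholek]]
  rfl
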